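-- pv_equiv track=rewrite | github.com/CristianAlm/grado-python | ejercicios_python/Clase02/diccionario_geringoso.py | agregar
-- ===== SOURCE A (Python) =====
-- def agregar(prueba):
--     local=[]
--     capadepenapa=''
--     for palabra in prueba:
--         for letra in palabra:
--             if letra=="a":
--                 capadepenapa=capadepenapa+letra+"pa"
--             elif letra=="e":
--                 capadepenapa=capadepenapa+letra+"pe"
--             elif letra=="i":
--                 capadepenapa=capadepenapa+letra+"pi"
--             elif letra=="o":
--                 capadepenapa=capadepenapa+letra+"po"
--             elif letra=="u":
--                 capadepenapa=capadepenapa+letra+"pu"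
--             else:
--                 capadepenapa=capadepenapa+letra
--         local.append(capadepenapa)
--         capadepenapa =''
--
--     dictgeringoso = dict(zip(prueba,local))
--     return dictgeringoso
-- ===== SOURCE B (Python) =====
-- def agregar(prueba):
--     tabla = str.maketrans({v: v + 'p' + v for v in 'aeiou'})
--     return {palabra: palabra.translate(tabla) for palabra in prueba}
-- ===== Notes on version B (the rewrite author's own statement) =====
-- stated objective: idiomatic
-- what changed: Replaces the per-character if/elif accumulation into a parallel list plus dict(zip(...)) with a translation table built once and a single dict comprehension using str.translate.
import Mathlib
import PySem

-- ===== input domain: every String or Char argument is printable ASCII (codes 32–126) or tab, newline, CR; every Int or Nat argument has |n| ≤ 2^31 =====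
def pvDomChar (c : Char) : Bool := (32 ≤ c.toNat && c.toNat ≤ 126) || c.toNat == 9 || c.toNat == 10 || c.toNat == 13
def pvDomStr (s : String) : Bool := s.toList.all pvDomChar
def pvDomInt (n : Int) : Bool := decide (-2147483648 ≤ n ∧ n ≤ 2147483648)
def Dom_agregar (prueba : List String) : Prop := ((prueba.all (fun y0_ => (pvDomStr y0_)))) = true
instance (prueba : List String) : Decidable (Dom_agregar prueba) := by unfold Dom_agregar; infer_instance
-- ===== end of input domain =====

-- B replaces A's per-character if/elif accumulation and dict(zip(prueba, local)) with a
-- vowel→syllable translation table applied per word inside a single dict comprehension (idiomatic).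

-- ===== PORT A =====
-- inner 'for letra in palabra' loop of A (characters; 'pa' etc. are the two-char lists)
def agregarWord (palabra : String) : String :=
  String.mk (palabra.toList.foldl (fun capadepenapa letra =>
    if letra = 'a' then capadepenapa ++ [letra] ++ ['p', 'a']
    else if letra = 'e' then capadepenapa ++ [letra] ++ ['p', 'e']
    else if letra = 'i' then capadepenapa ++ [letra] ++ ['p', 'i']
    else if letra = 'o' then capadepenapa ++ [letra] ++ ['p', 'o']
    else if letra = 'u' then capadepenapa ++ [letra] ++ ['p', 'u']
    else capadepenapa ++ [letra]) [])

def agregar (prueba : List String) : List (String × String) :=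
  let loc := prueba.foldl (fun acc palabra => acc ++ [agregarWord palabra]) []
  (PySem.Dict.ofList (prueba.zip loc)).items

-- ===== PORT B =====
-- the translation table: each vowel maps to vowel+'p'+vowel, every other char to itself
def geringosoTabla (c : Char) : List Char :=
  if c ∈ ['a', 'e', 'i', 'o', 'u'] then [c, 'p', c] else [c]

def agregar_alt (prueba : List String) : List (String × String) :=
  (prueba.foldl (fun d palabra =>
      d.insert palabra (String.mk (palabra.toList.flatMap geringosoTabla)))
    PySem.Dict.empty).items

-- ===== PRECONDITION & SPEC =====
def Spec_agregar (prueba : List String) (out : List (String × String)) : Prop := out = agregar_alt prueba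
instance (prueba : List String) (out : List (String × String)) : Decidable (Spec_agregar prueba out) := by unfold Spec_agregar; infer_instance

-- ===== CLAIM (what is proved, stated in full; the proofs are below) =====
def Claim_equal_agregar : Prop := ∀ (prueba : List String), Dom_agregar prueba → Spec_agregar prueba (agregar prueba)

-- ===== LEMMAS AND PROOFS =====

-- A's character loop computes exactly B's table-driven expansion of the word
theorem agregarWord_eq (palabra : String) :
    agregarWord palabra = String.mk (palabra.toList.flatMap geringosoTabla) := by
  unfold agregarWord
  have hf : (fun (capadepenapa : List Char) (letra : Char) =>
      if letra = 'a' then capadepenapa ++ [letra] ++ ['p', 'a']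
      else if letra = 'e' then capadepenapa ++ [letra] ++ ['p', 'e']
      else if letra = 'i' then capadepenapa ++ [letra] ++ ['p', 'i']
      else if letra = 'o' then capadepenapa ++ [letra] ++ ['p', 'o']
      else if letra = 'u' then capadepenapa ++ [letra] ++ ['p', 'u']
      else capadepenapa ++ [letra])
      = (fun acc c => acc ++ geringosoTabla c) := by
    funext acc c
    by_cases h1 : c = 'a' <;> by_cases h2 : c = 'e' <;> by_cases h3 : c = 'i' <;>
      by_cases h4 : c = 'o' <;> by_cases h5 : c = 'u' <;>
      simp_all [geringosoTabla]
  rw [hf, PySem.List.foldl_append_eq_flatMap]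
  simp

theorem agregar_spec : Claim_equal_agregar := by
  intro prueba _
  unfold Spec_agregar agregar agregar_alt
  rw [PySem.List.foldl_append_singleton_eq_map]
  simp only [List.nil_append]
  have hz : prueba.zip (prueba.map agregarWord)
      = prueba.map (fun p => (p, agregarWord p)) :=
    Eq.symm List.map_prod_left_eq_zip
  rw [hz]
  unfold PySem.Dict.ofList PySem.Dict.update
  rw [List.foldl_map]
  simp only [agregarWord_eq]
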